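-- pv_equiv track=rewrite | github.com/AAISSJ/AlgorithmStudy | week03/모의고사.py | solution
-- ===== SOURCE A (Python) =====
-- def solution(answers):
--     answer=[]
--     score=[]
--     give = [
--         [1, 2, 3, 4, 5],
--         [2, 1, 2, 3, 2, 4, 2, 5],
--         [3, 3, 1, 1, 2, 2, 4, 4, 5, 5]
--     ]
--
--     # 답 개수 세기
--     for i in range(len(give)):
--         tmp = give[i]
--         cnt = 0
--         for j in range(len(answers)):
--             # score.append(tmp[j//len(tmp)])
--             if answers[j]==tmp[j%len(tmp)]:
--                 cnt +=1
--         score.append(cnt)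
--
--     # 순위 정렬하기
--     max_score = max(score)
--     for i in range(len(score)):
--         if score[i]==max_score:
--             answer.append(i+1)
--
--     return answer
-- ===== SOURCE B (Python) =====
-- def solution(answers):
--     patterns = [
--         [1, 2, 3, 4, 5],
--         [2, 1, 2, 3, 2, 4, 2, 5],
--         [3, 3, 1, 1, 2, 2, 4, 4, 5, 5],
--     ]
--     L = 40  # common period of the three patterns: lcm(5, 8, 10)
--     # bucket the answers by (position mod the common period, value)
--     keys = [(j % L, a) for j, a in enumerate(answers)]
--     freq = {}
--     for k in keys:
--         freq[k] = freq.get(k, 0) + 1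
--     # score each pattern from the 40-bucket table, independent of len(answers)
--     scores = [sum(freq.get((r, p[r % len(p)]), 0) for r in range(L)) for p in patterns]
--     m = max(scores)
--     return [i + 1 for i, s in enumerate(scores) if s == m]
-- ===== Notes on version B (the rewrite author's own statement) =====
-- stated objective: alternative
-- what changed: A scans the whole answer list once per pattern, comparing against each cyclic pattern; B never compares answers to patterns directly: it buckets the answers into a frequency table keyed by (index mod 40, value) — 40 = lcm of the pattern lengths — and then scores each pattern by 40 table lookups, independent of the input length.
import Mathlib
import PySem

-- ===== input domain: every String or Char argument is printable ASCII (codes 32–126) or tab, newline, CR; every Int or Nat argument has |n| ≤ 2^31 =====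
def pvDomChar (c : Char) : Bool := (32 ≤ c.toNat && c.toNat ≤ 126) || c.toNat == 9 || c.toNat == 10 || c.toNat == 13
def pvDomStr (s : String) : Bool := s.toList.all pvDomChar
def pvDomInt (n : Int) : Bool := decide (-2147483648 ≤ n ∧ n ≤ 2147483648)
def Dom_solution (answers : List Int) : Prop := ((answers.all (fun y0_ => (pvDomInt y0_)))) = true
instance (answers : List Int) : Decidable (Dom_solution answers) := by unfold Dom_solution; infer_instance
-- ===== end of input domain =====

-- B replaces A's three pattern-comparing scans of the answers with a frequency table
-- keyed by (index mod 40, value) scored by 40 lookups per pattern (objective: alternative).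

-- ===== PORT A =====
-- A: for each of the 3 patterns, scan all of answers by index and count matches;
-- then max over the score list and a second index loop collecting i+1.
def pvGive : List (List Int) :=
  [[1, 2, 3, 4, 5],
   [2, 1, 2, 3, 2, 4, 2, 5],
   [3, 3, 1, 1, 2, 2, 4, 4, 5, 5]]

-- the inner 'for j in range(len(answers))' counting loop of A
def pvCntA (answers tmp : List Int) : Int :=
  (PySem.List.pyRange 0 (answers.length : Int) 1).foldl (fun cnt j =>
    if PySem.List.pyGetD answers j 0 =
        PySem.List.pyGetD tmp (PySem.Int.mod j (tmp.length : Int)) 0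
    then cnt + 1 else cnt) (0 : Int)

-- the outer 'for i in range(len(give))' loop building score
def pvScoreA (answers : List Int) : List Int :=
  (PySem.List.pyRange 0 (pvGive.length : Int) 1).foldl (fun sc i =>
    sc ++ [pvCntA answers (PySem.List.pyGetD pvGive i [])]) []

def solution (answers : List Int) : List Int :=
  -- max(score): score always has 3 elements, so Python's max never raises
  (PySem.List.pyRange 0 ((pvScoreA answers).length : Int) 1).foldl (fun ans i =>
    if PySem.List.pyGetD (pvScoreA answers) i 0 =
        (PySem.List.max? (pvScoreA answers) (fun x => x)).getD 0
    then ans ++ [i + 1] else ans) []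

-- ===== PORT B =====
-- B: keys = [(j % 40, a) for j, a in enumerate(answers)]; a counting dict over keys;
-- each pattern scored by 40 table lookups; then max and a comprehension.
def pvPats : List (List Int) :=
  [[1, 2, 3, 4, 5],
   [2, 1, 2, 3, 2, 4, 2, 5],
   [3, 3, 1, 1, 2, 2, 4, 4, 5, 5]]

def pvKeys (answers : List Int) : List (Int × Int) :=
  (PySem.List.enumerate answers).map (fun ja => (PySem.Int.mod ja.1 40, ja.2))

-- 'for k in keys: freq[k] = freq.get(k, 0) + 1'
def pvFreq (answers : List Int) : PySem.Dict (Int × Int) Int :=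
  (pvKeys answers).foldl (fun d k => d.insert k (d.getD k 0 + 1)) PySem.Dict.empty

-- 'scores = [sum(freq.get((r, p[r % len(p)]), 0) for r in range(L)) for p in patterns]'
def pvScoreB (answers : List Int) : List Int :=
  pvPats.map (fun p =>
    ((PySem.List.pyRange 0 40 1).map (fun r =>
      (pvFreq answers).getD (r, PySem.List.pyGetD p (PySem.Int.mod r (p.length : Int)) 0) 0)).sum)

def solution_alt (answers : List Int) : List Int :=
  ((PySem.List.enumerate (pvScoreB answers)).filter
    (fun is => is.2 == (PySem.List.max? (pvScoreB answers) (fun x => x)).getD 0)).map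
    (fun is => is.1 + 1)

-- ===== PRECONDITION & SPEC =====
def Spec_solution (answers : List Int) (out : List Int) : Prop := out = solution_alt answers
instance (answers : List Int) (out : List Int) : Decidable (Spec_solution answers out) := by unfold Spec_solution; infer_instance

-- ===== CLAIM (what is proved, stated in full; the proofs are below) =====
def Claim_equal_solution : Prop := ∀ (answers : List Int), Dom_solution answers → Spec_solution answers (solution answers)

-- ===== LEMMAS AND PROOFS =====

-- A's per-pattern index-loop count is a countP over the enumerated answers
theorem pv_count_eq (answers p : List Int) :
    pvCntA answers p =
      ((PySem.List.enumerate answers).countP (fun ja =>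
        ja.2 == PySem.List.pyGetD p (PySem.Int.mod ja.1 (p.length : Int)) 0) : Int) := by
  unfold pvCntA
  rw [PySem.List.enumerate_eq_map_pyRange (d := 0), List.countP_map]
  have hfun : (fun (cnt j : Int) =>
      if PySem.List.pyGetD answers j 0 =
          PySem.List.pyGetD p (PySem.Int.mod j (p.length : Int)) 0
      then cnt + 1 else cnt)
    = fun (cnt j : Int) =>
      if (PySem.List.pyGetD answers j 0 ==
          PySem.List.pyGetD p (PySem.Int.mod j (p.length : Int)) 0) = true
      then cnt + 1 else cnt := by
    funext cnt j; simp only [beq_iff_eq]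
  rw [hfun, PySem.List.foldl_count_if]
  simp only [Int.zero_add, PySem.List.len_eq]
  rfl

-- the bucket identity: summing the table counts of (r, f r) over r ∈ range(40)
-- counts exactly the pairs whose value matches f at their residue
theorem pv_bucket (l : List (Int × Int)) (f : Int → Int) :
    ((PySem.List.pyRange 0 40 1).map (fun r =>
      ((l.map (fun ja => (PySem.Int.mod ja.1 40, ja.2))).count (r, f r) : Int))).sum
    = (l.countP (fun ja => ja.2 == f (PySem.Int.mod ja.1 40)) : Int) := by
  induction l with
  | nil => simp
  | cons k l ih =>
    have hm0 : 0 ≤ PySem.Int.mod k.1 40 := PySem.Int.mod_nonneg _ (by norm_num)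
    have hm1 : PySem.Int.mod k.1 40 < 40 := PySem.Int.mod_lt _ (by norm_num)
    have hcount : ∀ r : Int,
        ((l.map (fun ja => (PySem.Int.mod ja.1 40, ja.2))).count (r, f r) : Int)
          + (if (PySem.Int.mod k.1 40, k.2) = (r, f r) then 1 else 0)
        = (((k :: l).map (fun ja => (PySem.Int.mod ja.1 40, ja.2))).count (r, f r) : Int) := by
      intro r
      simp only [List.map_cons, List.count_cons]
      split_ifs with h1 h2 h2 <;> simp_all
    calc ((PySem.List.pyRange 0 40 1).map (fun r =>
            (((k :: l).map (fun ja => (PySem.Int.mod ja.1 40, ja.2))).count (r, f r) : Int))).sum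
        = ((PySem.List.pyRange 0 40 1).map (fun r =>
            ((l.map (fun ja => (PySem.Int.mod ja.1 40, ja.2))).count (r, f r) : Int)
            + (if (PySem.Int.mod k.1 40, k.2) = (r, f r) then 1 else 0))).sum := by
          refine congrArg List.sum (List.map_congr_left ?_)
          intro r _; exact (hcount r).symm
      _ = ((PySem.List.pyRange 0 40 1).map (fun r =>
            ((l.map (fun ja => (PySem.Int.mod ja.1 40, ja.2))).count (r, f r) : Int))).sum
          + ((PySem.List.pyRange 0 40 1).map (fun r =>
            (if (PySem.Int.mod k.1 40, k.2) = (r, f r) then 1 else 0 : Int))).sum := by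
          rw [PySem.List.sum_map_add_int]
      _ = (l.countP (fun ja => ja.2 == f (PySem.Int.mod ja.1 40)) : Int)
          + (if k.2 = f (PySem.Int.mod k.1 40) then 1 else 0) := by
          rw [ih]
          congr 1
          by_cases hf : k.2 = f (PySem.Int.mod k.1 40)
          · rw [if_pos hf]
            have : ((PySem.List.pyRange 0 40 1).map (fun r =>
                (if (PySem.Int.mod k.1 40, k.2) = (r, f r) then 1 else 0 : Int)))
              = ((PySem.List.pyRange 0 40 1).map (fun r =>
                (if r = PySem.Int.mod k.1 40 then 1 else 0 : Int))) := by
              refine List.map_congr_left ?_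
              intro r _
              by_cases hr : r = PySem.Int.mod k.1 40
              · subst hr
                rw [if_pos (show (PySem.Int.mod k.1 40, k.2)
                      = (PySem.Int.mod k.1 40, f (PySem.Int.mod k.1 40)) from by rw [← hf]),
                    if_pos rfl]
              · rw [if_neg (fun h => hr (congrArg Prod.fst h).symm), if_neg hr]
            rw [this]
            have hmem : PySem.Int.mod k.1 40 ∈ PySem.List.pyRange 0 40 1 :=
              (PySem.List.mem_pyRange_one).2 ⟨hm0, hm1⟩
            have hbool : ((PySem.List.pyRange 0 40 1).map (fun r =>
                (if r = PySem.Int.mod k.1 40 then 1 else 0 : Int)))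
              = ((PySem.List.pyRange 0 40 1).map (fun r =>
                (if (r == PySem.Int.mod k.1 40) = true then 1 else 0 : Int))) := by
              simp only [beq_iff_eq]
            rw [hbool, PySem.List.sum_map_ite_one_zero, ← List.count_eq_countP,
                List.count_eq_one_of_mem (PySem.List.nodup_pyRange_one 0 40) hmem]
            rfl
          · rw [if_neg hf]
            have : ((PySem.List.pyRange 0 40 1).map (fun r =>
                (if (PySem.Int.mod k.1 40, k.2) = (r, f r) then 1 else 0 : Int)))
              = ((PySem.List.pyRange 0 40 1).map (fun _ => (0 : Int))) := by
              refine List.map_congr_left ?_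
              intro r _
              rw [if_neg]
              intro h
              exact hf ((congrArg Prod.snd h).trans
                (congrArg f (congrArg Prod.fst h).symm))
            rw [this]; simp
      _ = ((k :: l).countP (fun ja => ja.2 == f (PySem.Int.mod ja.1 40)) : Int) := by
          rw [List.countP_cons]
          by_cases hf : k.2 = f (PySem.Int.mod k.1 40) <;> simp [hf]

-- a table lookup is a count over the key list
theorem pv_freq_getD (answers : List Int) (k : Int × Int) :
    (pvFreq answers).getD k 0 = ((pvKeys answers).count k : Int) := by
  unfold pvFreq
  rw [PySem.Dict.getD_foldl_insert_add_one]
  simp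

-- B's score of pattern p equals A's match count, for the three pattern lengths
theorem pv_score_entry (answers p : List Int) (hd : (p.length : Int) ∣ 40) :
    ((PySem.List.pyRange 0 40 1).map (fun r =>
      (pvFreq answers).getD (r, PySem.List.pyGetD p (PySem.Int.mod r (p.length : Int)) 0) 0)).sum
    = pvCntA answers p := by
  have hlen : (0 : Int) < (p.length : Int) := by
    rcases Nat.eq_zero_or_pos p.length with h | h
    · exfalso; rw [h] at hd; norm_num at hd
    · exact_mod_cast h
  rw [pv_count_eq]
  have hkey : ∀ k : Int × Int,
      (pvFreq answers).getD k 0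
        = (((PySem.List.enumerate answers).map (fun ja => (PySem.Int.mod ja.1 40, ja.2))).count k : Int) := by
    intro k; rw [pv_freq_getD]; rfl
  simp only [hkey]
  rw [pv_bucket (PySem.List.enumerate answers)
      (fun r => PySem.List.pyGetD p (PySem.Int.mod r (p.length : Int)) 0)]
  congr 1
  refine List.countP_congr ?_
  intro ja _
  have : PySem.Int.mod (PySem.Int.mod ja.1 40) (p.length : Int)
      = PySem.Int.mod ja.1 (p.length : Int) := by
    rw [PySem.Int.mod_eq_emod_of_pos (by norm_num : (0:Int) < 40),
        PySem.Int.mod_eq_emod_of_pos hlen, PySem.Int.mod_eq_emod_of_pos hlen]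
    exact Int.emod_emod_of_dvd ja.1 hd
  rw [this]

-- both score lists are [cnt p1, cnt p2, cnt p3]
theorem pv_scoreB_eq (answers : List Int) :
    pvScoreB answers =
      [pvCntA answers [1,2,3,4,5], pvCntA answers [2,1,2,3,2,4,2,5],
       pvCntA answers [3,3,1,1,2,2,4,4,5,5]] := by
  unfold pvScoreB pvPats
  simp only [List.map_cons, List.map_nil]
  rw [pv_score_entry answers _ (by decide), pv_score_entry answers _ (by decide),
      pv_score_entry answers _ (by decide)]

theorem pv_scoreA_eq (answers : List Int) :
    pvScoreA answers =
      [pvCntA answers [1,2,3,4,5], pvCntA answers [2,1,2,3,2,4,2,5],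
       pvCntA answers [3,3,1,1,2,2,4,4,5,5]] := by
  unfold pvScoreA
  rw [show PySem.List.pyRange 0 (pvGive.length : Int) 1 = [0, 1, 2] from by decide]
  simp only [List.foldl_cons, List.foldl_nil, List.nil_append]
  rw [show PySem.List.pyGetD pvGive 0 [] = [1,2,3,4,5] from by decide,
      show PySem.List.pyGetD pvGive 1 [] = [2,1,2,3,2,4,2,5] from by decide,
      show PySem.List.pyGetD pvGive 2 [] = [3,3,1,1,2,2,4,4,5,5] from by decide]
  rfl

-- ===== VERDICT (by name: the statement is the Claim_ definition above) =====
theorem solution_spec : Claim_equal_solution := by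
  intro answers _
  show solution answers = solution_alt answers
  unfold solution solution_alt
  rw [pv_scoreA_eq, pv_scoreB_eq]
  generalize pvCntA answers [1,2,3,4,5] = a
  generalize pvCntA answers [2,1,2,3,2,4,2,5] = b
  generalize pvCntA answers [3,3,1,1,2,2,4,4,5,5] = c
  rw [show (([a, b, c] : List Int).length : Int) = 3 from by simp,
      show PySem.List.pyRange 0 3 1 = [0, 1, 2] from by decide]
  simp only [List.foldl_cons, List.foldl_nil,
    PySem.List.enumerate_cons, PySem.List.enumerate_nil,
    List.filter_cons, List.filter_nil,
    PySem.List.pyGetD_zero_cons]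
  rw [show PySem.List.pyGetD ([a, b, c] : List Int) 1 0 = b from by
        rw [PySem.List.pyGetD_ofNat']; rfl,
      show PySem.List.pyGetD ([a, b, c] : List Int) 2 0 = c from by
        rw [PySem.List.pyGetD_ofNat']; rfl]
  simp only [beq_iff_eq]
  generalize (PySem.List.max? ([a, b, c] : List Int) (fun x => x)).getD 0 = m
  split_ifs <;> simp
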